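-- pv_equiv track=rewrite | github.com/dl8sd11/online-judge | icpc-archive/3564.py | solve
-- ===== SOURCE A (Python) =====
-- def solve (x):
--     res = -1
--     par = [0, 0, 0, 0]
--
--     for mn in range(1, 1000):
--         pre11 = 0
--         for i in range(mn):
--             pre11 = pre11 * 10 + 1
--             pre11 %= x
--
--         suf11 = 0
--         pw = 1
--         for n in range(1, mn):
--             suf11 = suf11 * 10 + 1
--             suf11 %= x
--
--             pre11 = pre11 - pw + x
--             pre11 %= x
--
--             pw *= 10
--             pw %= x
--
--             m = mn - n
--
--             prexx = 0
--             for s in range(1, 10):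
--                 prexx += pre11
--                 prexx %= x
--                 sufxx = 0
--                 for t in range(0, 10):
--                     num = prexx + sufxx
--                     num %= x
--                     if s != t:
--                         if num == 0 and (res == -1 or [par[1],par[0],par[3]] > [s,m,t]):
--                             res = num
--                             par = [m, s, n, t]
--                     sufxx += suf11
--                     sufxx %= x
--         if res != -1:
--             break
--     return par
-- ===== SOURCE B (Python) =====
-- def solve(x):
--     # Build each candidate integer s...s t...t directly and return the first
--     # divisible one in (s, m, t) lexicographic order; first feasible total
--     # length wins, [0, 0, 0, 0] if none up to 999 digits.
--     for mn in range(2, 1000):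
--         for s in range(1, 10):
--             for m in range(1, mn):
--                 k = mn - m
--                 pre = s * ((10 ** m - 1) // 9) * 10 ** k
--                 rep_k = (10 ** k - 1) // 9
--                 for t in range(0, 10):
--                     if t != s and (pre + t * rep_k) % x == 0:
--                         return [m, s, k, t]
--     return [0, 0, 0, 0]
-- ===== Notes on version B (the rewrite author's own statement) =====
-- stated objective: simpler
-- what changed: Replaces A's rolling modular recurrences (repunit/power remainders updated in place) and its running lexicographic-minimum fold over all candidates of a length with direct construction of each candidate number s^m t^k and an early first-hit return in (s, m, t) lexicographic order.
-- outside the precondition, e.g. on solve(0): A raises ZeroDivisionError, B raises ZeroDivisionError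
import Mathlib
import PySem

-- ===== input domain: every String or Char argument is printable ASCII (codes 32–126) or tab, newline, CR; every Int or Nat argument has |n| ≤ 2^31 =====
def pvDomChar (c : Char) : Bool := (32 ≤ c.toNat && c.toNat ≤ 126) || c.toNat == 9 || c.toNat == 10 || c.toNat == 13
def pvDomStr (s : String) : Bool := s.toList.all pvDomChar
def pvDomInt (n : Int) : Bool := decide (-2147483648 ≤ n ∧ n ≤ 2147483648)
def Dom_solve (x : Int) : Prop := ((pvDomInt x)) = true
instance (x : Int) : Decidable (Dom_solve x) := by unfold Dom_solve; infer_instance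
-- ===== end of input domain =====

-- B replaces A's rolling modular remainder recurrences and running lexicographic-minimum
-- fold with direct construction of each candidate integer and a first-hit early return
-- in (s, m, t) lexicographic order (objective: simpler).


-- ===== PORT A =====
-- Python list comparison [a1,a2,a3] > [b1,b2,b3] on length-3 int lists (exact)
def pyListGt3 (a1 a2 a3 b1 b2 b3 : Int) : Bool :=
  a1 > b1 || (a1 == b1 && (a2 > b2 || (a2 == b2 && (a3 > b3))))

-- state (res, par-m, par-s, par-n, par-t); par starts as [0,0,0,0], res as -1
-- inner t-loop body; carried state (sufxx, res, pm, ps, pn, pt)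
def stepT (x prexx suf11 m n s : Int)
    (st : Int × Int × Int × Int × Int × Int) (t : Int) :
    Int × Int × Int × Int × Int × Int :=
  match st with
  | (sufxx, res, pm, ps, pn, pt) =>
    let num := PySem.Int.mod (prexx + sufxx) x
    let st' :=
      if s ≠ t then
        if num = 0 ∧ (res = -1 ∨ pyListGt3 ps pm pt s m t = true) then
          (num, m, s, n, t)
        else (res, pm, ps, pn, pt)
      else (res, pm, ps, pn, pt)
    (PySem.Int.mod (sufxx + suf11) x, st')

-- s-loop body; carried state (prexx, res, pm, ps, pn, pt)
def stepS (x pre11 suf11 m n : Int)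
    (st : Int × Int × Int × Int × Int × Int) (s : Int) :
    Int × Int × Int × Int × Int × Int :=
  match st with
  | (prexx, res, pm, ps, pn, pt) =>
    let prexx' := PySem.Int.mod (prexx + pre11) x
    let r := (PySem.List.pyRange 0 10 1).foldl (stepT x prexx' suf11 m n s)
      (0, res, pm, ps, pn, pt)
    (prexx', r.2)

-- n-loop body; carried state (suf11, pre11, pw, res, pm, ps, pn, pt)
def stepN (x mn : Int)
    (st : Int × Int × Int × Int × Int × Int × Int × Int) (n : Int) :
    Int × Int × Int × Int × Int × Int × Int × Int :=
  match st with
  | (suf11, pre11, pw, res, pm, ps, pn, pt) =>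
    let suf11' := PySem.Int.mod (suf11 * 10 + 1) x
    let pre11' := PySem.Int.mod (pre11 - pw + x) x
    let pw' := PySem.Int.mod (pw * 10) x
    let m := mn - n
    let r := (PySem.List.pyRange 1 10 1).foldl (stepS x pre11' suf11' m n)
      (0, res, pm, ps, pn, pt)
    (suf11', pre11', pw', r.2)

-- outer mn-loop with the Python `break` when res != -1
def mnLoopA (x : Int) : List Int → Int × Int × Int × Int × Int → Int × Int × Int × Int × Int
  | [], st => st
  | mn :: rest, st =>
    let pre11 := (PySem.List.pyRange 0 mn 1).foldl
      (fun p _ => PySem.Int.mod (p * 10 + 1) x) 0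
    let r := (PySem.List.pyRange 1 mn 1).foldl (stepN x mn)
      (0, pre11, 1, st.1, st.2.1, st.2.2.1, st.2.2.2.1, st.2.2.2.2)
    let st' := (r.2.2.2.1, r.2.2.2.2.1, r.2.2.2.2.2.1, r.2.2.2.2.2.2.1, r.2.2.2.2.2.2.2)
    if st'.1 ≠ -1 then st' else mnLoopA x rest st'

def solve (x : Int) : List Int :=
  let st := mnLoopA x (PySem.List.pyRange 1 1000 1) (-1, 0, 0, 0, 0)
  [st.2.1, st.2.2.1, st.2.2.2.1, st.2.2.2.2]

-- ===== PORT B =====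
-- (10 ** m - 1) // 9 ; Python 10 ** m ported as 10 ^ m.toNat (exact for m ≥ 0, all uses have m ≥ 1)
def repB (m : Int) : Int := PySem.Int.floordiv (10 ^ m.toNat - 1) 9

-- B's per-length search: first hit in (s, m, t) lexicographic order
def bPerMn (x mn : Int) : Option (List Int) :=
  (PySem.List.pyRange 1 10 1).findSome? fun s =>
    (PySem.List.pyRange 1 mn 1).findSome? fun m =>
      let k := mn - m
      let pre := s * repB m * 10 ^ k.toNat
      let repk := repB k
      (PySem.List.pyRange 0 10 1).findSome? fun t =>
        if t ≠ s ∧ PySem.Int.mod (pre + t * repk) x = 0 then some [m, s, k, t] else none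

def solve_alt (x : Int) : List Int :=
  ((PySem.List.pyRange 2 1000 1).findSome? (bPerMn x)).getD [0, 0, 0, 0]

-- ===== PRECONDITION & SPEC =====
-- Pre_ excludes only x = 0, where Python A raises ZeroDivisionError (B raises it too).
def Pre_solve (x : Int) : Prop := x ≠ 0
instance (x : Int) : Decidable (Pre_solve x) := by unfold Pre_solve; infer_instance
def pvWitness_solve : Int := 7

def Spec_solve (x : Int) (out : List Int) : Prop := out = solve_alt x
instance (x : Int) (out : List Int) : Decidable (Spec_solve x out) := by unfold Spec_solve; infer_instance

-- ===== CLAIM (what is proved, stated in full; the proofs are below) =====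
def Claim_equal_solve : Prop := ∀ (x : Int), Dom_solve x → Pre_solve x → Spec_solve x (solve x)

-- ===== LEMMAS AND PROOFS =====

-- ---- proof-side basic objects ----
abbrev S5 := Int × Int × Int × Int × Int
abbrev Trip := Int × Int × Int   -- (s, m, t)

-- repunit with c ones
def R : Nat → Int
  | 0 => 0
  | c + 1 => R c * 10 + 1

-- strict lexicographic order on (s, m, t), as Python's list compare uses it
abbrev ltP (p q : Trip) : Prop :=
  p.1 < q.1 ∨ (p.1 = q.1 ∧ (p.2.1 < q.2.1 ∨ (p.2.1 = q.2.1 ∧ p.2.2 < q.2.2)))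

-- the candidate number s…s t…t (m copies of s, mn-m copies of t)
def NvT (mn : Int) (p : Trip) : Int :=
  p.1 * repB p.2.1 * 10 ^ (mn - p.2.1).toNat + p.2.2 * repB (mn - p.2.1)

abbrev hitP (x mn : Int) (p : Trip) : Prop :=
  p.2.2 ≠ p.1 ∧ PySem.Int.mod (NvT mn p) x = 0

def valT (mn : Int) (p : Trip) : S5 := (0, p.2.1, p.1, mn - p.2.1, p.2.2)

-- pure state update distilled from A's innermost conditional
def updT (x mn : Int) (st : S5) (p : Trip) : S5 :=
  if hitP x mn p ∧ (st.1 = -1 ∨ ltP p (st.2.2.1, st.2.1, st.2.2.2.2)) then valT mn p else st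

def min2 (x mn : Int) (q p : Trip) : Trip := if hitP x mn p ∧ ltP p q then p else q

def tBlock (mn n : Int) : List Trip :=
  (PySem.List.pyRange 1 10).flatMap fun s =>
    (PySem.List.pyRange 0 10).map fun t => (s, mn - n, t)

def tripsFrom (mn n0 : Int) : List Trip := (PySem.List.pyRange n0 mn).flatMap (tBlock mn)

def minHit? (x mn : Int) (L : List Trip) : Option Trip :=
  L.foldl (fun acc p =>
    match acc with
    | none => if hitP x mn p then some p else none
    | some q => some (min2 x mn q p)) none

abbrev inR (mn : Int) (p : Trip) : Prop :=
  1 ≤ p.1 ∧ p.1 < 10 ∧ 1 ≤ p.2.1 ∧ p.2.1 < mn ∧ 0 ≤ p.2.2 ∧ p.2.2 < 10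

-- ---- arithmetic lemmas ----
theorem R_mul9 (c : Nat) : 9 * R c = 10 ^ c - 1 := by
  induction c with
  | zero => simp [R]
  | succ c ih => rw [R, pow_succ]; omega

theorem repB_eq (m : Int) : repB m = R m.toNat := by
  unfold repB
  rw [show (10:Int) ^ m.toNat - 1 = 9 * R m.toNat from by have := R_mul9 m.toNat; omega,
    PySem.Int.floordiv_eq_ediv_of_pos (by norm_num)]
  exact Int.mul_ediv_cancel_left _ (by norm_num)

theorem R_succ_pow (c : Nat) : R (c + 1) = R c + 10 ^ c := by
  have h1 := R_mul9 c
  have h2 := R_mul9 (c + 1)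
  rw [pow_succ] at h2
  omega

theorem R_add (a b : Nat) : R (a + b) = R a * 10 ^ b + R b := by
  induction b with
  | zero => simp [R]
  | succ b ih => rw [show a + (b+1) = (a+b)+1 from rfl, R, ih, R, pow_succ]; ring

theorem pymod_modEq (a x : Int) : PySem.Int.mod a x ≡ a [ZMOD x] := by
  refine Int.modEq_iff_dvd.2 ⟨PySem.Int.floordiv a x, ?_⟩
  have h := PySem.Int.floordiv_mul_add_mod a x
  linarith [mul_comm (PySem.Int.floordiv a x) x]

theorem mod_zero_iff_of_modEq {x a b : Int} (h : a ≡ b [ZMOD x]) :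
    PySem.Int.mod a x = 0 ↔ x ∣ b := by
  rw [PySem.Int.mod_eq_zero_iff_dvd]
  have hd : x ∣ b - a := Int.ModEq.dvd h
  constructor
  · intro ha; simpa using dvd_add hd ha
  · intro hb; simpa using dvd_sub hb hd

theorem gt3_eq_ltP (a1 a2 a3 b1 b2 b3 : Int) :
    pyListGt3 a1 a2 a3 b1 b2 b3 = true ↔ ltP (b1, b2, b3) (a1, a2, a3) := by
  simp [pyListGt3, ltP, Bool.or_eq_true, Bool.and_eq_true, decide_eq_true_eq]
  omega

-- ---- order lemmas ----
theorem ltP_trans {a b c : Trip} (h1 : ltP a b) (h2 : ltP b c) : ltP a c := by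
  obtain ⟨a1, a2, a3⟩ := a; obtain ⟨b1, b2, b3⟩ := b; obtain ⟨c1, c2, c3⟩ := c
  simp only [ltP] at *
  omega

-- ---- phase 1 : A's modular loops compute the pure fold over tripsFrom ----
theorem pre0_cong (x : Int) : ∀ (L : List Int) (p : Int) (c : Nat), p ≡ R c [ZMOD x] →
    L.foldl (fun q _ => PySem.Int.mod (q * 10 + 1) x) p ≡ R (c + L.length) [ZMOD x] := by
  intro L
  induction L with
  | nil => intro p c h; simpa using h
  | cons a L ih =>
    intro p c h
    simp only [List.foldl_cons, List.length_cons]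
    have h1 : PySem.Int.mod (p * 10 + 1) x ≡ R (c + 1) [ZMOD x] := by
      have : p * 10 + 1 ≡ R c * 10 + 1 [ZMOD x] := (h.mul_right 10).add_right 1
      exact (pymod_modEq _ x).trans this
    have := ih _ (c + 1) h1
    rwa [show c + (L.length + 1) = (c + 1) + L.length from by omega]

theorem tLoop_eq (x mn m n s prexx suf11 : Int) (hm : m = mn - n)
    (hprexx : prexx ≡ s * (repB m * 10 ^ (mn - m).toNat) [ZMOD x])
    (hsuf11 : suf11 ≡ repB (mn - m) [ZMOD x]) :
    ∀ (c : Nat) (t0 sufxx : Int) (st : S5), t0 = 10 - c →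
      sufxx ≡ t0 * repB (mn - m) [ZMOD x] →
      ((PySem.List.pyRange t0 10).foldl (stepT x prexx suf11 m n s) (sufxx, st)).2
        = (PySem.List.pyRange t0 10).foldl (fun st2 t => updT x mn st2 (s, m, t)) st := by
  intro c
  induction c with
  | zero =>
    intro t0 sufxx st ht _
    rw [PySem.List.pyRange_one_eq_nil (by omega)]
    simp
  | succ c ih =>
    intro t0 sufxx st ht hsx
    rw [PySem.List.pyRange_one_cons (show t0 < 10 by omega)]
    simp only [List.foldl_cons]
    obtain ⟨res, pm, ps, pn, pt⟩ := st
    have hnum : (PySem.Int.mod (prexx + sufxx) x = 0)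
        ↔ (PySem.Int.mod (NvT mn (s, m, t0)) x = 0) := by
      have hc : prexx + sufxx ≡ NvT mn (s, m, t0) [ZMOD x] := by
        have := hprexx.add hsx
        have he : s * (repB m * 10 ^ (mn - m).toNat) + t0 * repB (mn - m)
            = NvT mn (s, m, t0) := by unfold NvT; ring
        rwa [he] at this
      exact (mod_zero_iff_of_modEq hc).trans
        (PySem.Int.mod_eq_zero_iff_dvd _ _).symm
    have hstep : stepT x prexx suf11 m n s (sufxx, (res, pm, ps, pn, pt)) t0
        = (PySem.Int.mod (sufxx + suf11) x, updT x mn (res, pm, ps, pn, pt) (s, m, t0)) := by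
      simp only [stepT, updT]
      by_cases h1 : s = t0
      · subst h1; simp [hitP]
      · have h1' : t0 ≠ s := Ne.symm h1
        by_cases h2 : PySem.Int.mod (NvT mn (s, m, t0)) x = 0
        · have hnum0 : PySem.Int.mod (prexx + sufxx) x = 0 := hnum.2 h2
          by_cases h3 : res = -1 ∨ ltP (s, m, t0) (ps, pm, pt)
          · simp [hitP, valT, h1, h1', h2, h3, hnum0, gt3_eq_ltP, Prod.ext_iff]
            omega
          · simp [hitP, h1, h1', h2, h3, hnum0, gt3_eq_ltP]
        · have hnum0 : ¬ PySem.Int.mod (prexx + sufxx) x = 0 := fun hh => h2 (hnum.1 hh)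
          simp [hitP, h1, h1', h2, hnum0, gt3_eq_ltP]
    rw [hstep]
    exact ih (t0 + 1) _ _ (by omega)
      (by
        have : sufxx + suf11 ≡ (t0 + 1) * repB (mn - m) [ZMOD x] := by
          have := hsx.add hsuf11
          rwa [show t0 * repB (mn - m) + repB (mn - m) = (t0 + 1) * repB (mn - m) from by ring] at this
        exact (pymod_modEq _ x).trans this)

theorem sLoop_eq (x mn m n pre11 suf11 : Int) (hm : m = mn - n)
    (hpre11 : pre11 ≡ repB m * 10 ^ (mn - m).toNat [ZMOD x])
    (hsuf11 : suf11 ≡ repB (mn - m) [ZMOD x]) :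
    ∀ (c : Nat) (s0 prexx : Int) (st : S5), s0 = 10 - c →
      prexx ≡ (s0 - 1) * (repB m * 10 ^ (mn - m).toNat) [ZMOD x] →
      ((PySem.List.pyRange s0 10).foldl (stepS x pre11 suf11 m n) (prexx, st)).2
        = (PySem.List.pyRange s0 10).foldl
            (fun st2 s => (PySem.List.pyRange 0 10).foldl
              (fun st3 t => updT x mn st3 (s, m, t)) st2) st := by
  intro c
  induction c with
  | zero =>
    intro s0 prexx st hs _
    rw [PySem.List.pyRange_one_eq_nil (by omega)]
    simp
  | succ c ih =>
    intro s0 prexx st hs hpx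
    rw [PySem.List.pyRange_one_cons (show s0 < 10 by omega)]
    simp only [List.foldl_cons]
    obtain ⟨res, pm, ps, pn, pt⟩ := st
    have hpx' : PySem.Int.mod (prexx + pre11) x
        ≡ s0 * (repB m * 10 ^ (mn - m).toNat) [ZMOD x] := by
      have := hpx.add hpre11
      rw [show (s0 - 1) * (repB m * 10 ^ (mn - m).toNat) + repB m * 10 ^ (mn - m).toNat
        = s0 * (repB m * 10 ^ (mn - m).toNat) from by ring] at this
      exact (pymod_modEq _ x).trans this
    have hstep : stepS x pre11 suf11 m n (prexx, (res, pm, ps, pn, pt)) s0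
        = (PySem.Int.mod (prexx + pre11) x,
           (PySem.List.pyRange 0 10).foldl
             (fun st2 t => updT x mn st2 (s0, m, t)) (res, pm, ps, pn, pt)) := by
      simp only [stepS]
      exact congrArg (Prod.mk _)
        (tLoop_eq x mn m n s0 (PySem.Int.mod (prexx + pre11) x) suf11 hm hpx' hsuf11
          10 0 0 (res, pm, ps, pn, pt) (by norm_num) (by rw [zero_mul]))
    rw [hstep]
    exact ih (s0 + 1) _ _ (by omega)
      (by rwa [show ((s0 : Int) + 1 - 1) = s0 from by ring])

theorem tripsFrom_cons {mn n0 : Int} (h : n0 < mn) :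
    tripsFrom mn n0 = tBlock mn n0 ++ tripsFrom mn (n0 + 1) := by
  unfold tripsFrom
  rw [PySem.List.pyRange_one_cons h, List.flatMap_cons]

theorem nLoop_eq (x mn : Int) : ∀ (c : Nat) (n0 suf pre pw : Int) (st : S5),
    (mn - n0).toNat = c → 1 ≤ n0 →
    suf ≡ R (n0 - 1).toNat [ZMOD x] →
    pre ≡ R mn.toNat - R (n0 - 1).toNat [ZMOD x] →
    pw ≡ 10 ^ (n0 - 1).toNat [ZMOD x] →
    ((PySem.List.pyRange n0 mn).foldl (stepN x mn) (suf, pre, pw, st)).2.2.2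
      = (tripsFrom mn n0).foldl (updT x mn) st := by
  intro c
  induction c with
  | zero =>
    intro n0 suf pre pw st hc h1 _ _ _
    rw [PySem.List.pyRange_one_eq_nil (by omega)]
    unfold tripsFrom
    rw [PySem.List.pyRange_one_eq_nil (by omega)]
    simp
  | succ c ih =>
    intro n0 suf pre pw st hc h1 hsuf hpre hpw
    have hlt : n0 < mn := by omega
    rw [PySem.List.pyRange_one_cons hlt]
    simp only [List.foldl_cons]
    rw [tripsFrom_cons hlt, List.foldl_append]
    obtain ⟨res, pm, ps, pn, pt⟩ := st
    have ha : n0.toNat = (n0 - 1).toNat + 1 := by omega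
    have hx0 : (x : Int) ≡ 0 [ZMOD x] := Int.modEq_zero_iff_dvd.2 dvd_rfl
    have hsuf' : PySem.Int.mod (suf * 10 + 1) x ≡ R n0.toNat [ZMOD x] := by
      have := (hsuf.mul_right 10).add_right 1
      rw [ha]
      exact (pymod_modEq _ x).trans this
    have hpw' : PySem.Int.mod (pw * 10) x ≡ 10 ^ n0.toNat [ZMOD x] := by
      have := hpw.mul_right 10
      rw [ha, pow_succ]
      exact (pymod_modEq _ x).trans this
    have hm : mn - n0 = mn - n0 := rfl
    have hmm : mn - (mn - n0) = n0 := by omega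
    have hsplit : R mn.toNat = R (mn - n0).toNat * 10 ^ n0.toNat + R n0.toNat := by
      rw [show mn.toNat = (mn - n0).toNat + n0.toNat from by omega]
      exact R_add _ _
    have hpre' : PySem.Int.mod (pre - pw + x) x
        ≡ repB (mn - n0) * 10 ^ (mn - (mn - n0)).toNat [ZMOD x] := by
      have h2 := (hpre.sub hpw).add hx0
      have h3 : R mn.toNat - R (n0 - 1).toNat - 10 ^ (n0 - 1).toNat + 0
          = repB (mn - n0) * 10 ^ (mn - (mn - n0)).toNat := by
        rw [repB_eq, hmm, hsplit, ha, R_succ_pow]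
        ring
      rw [h3] at h2
      exact (pymod_modEq _ x).trans h2
    have hsuf'' : PySem.Int.mod (suf * 10 + 1) x ≡ repB (mn - (mn - n0)) [ZMOD x] := by
      rw [hmm, repB_eq]
      exact hsuf'
    have hblock : (PySem.List.pyRange 1 10).foldl
        (fun st2 s => (PySem.List.pyRange 0 10).foldl
          (fun st3 t => updT x mn st3 (s, mn - n0, t)) st2) (res, pm, ps, pn, pt)
        = (tBlock mn n0).foldl (updT x mn) (res, pm, ps, pn, pt) := by
      rw [tBlock, List.foldl_flatMap]
      simp only [List.foldl_map]
    have hstep : stepN x mn (suf, pre, pw, (res, pm, ps, pn, pt)) n0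
        = (PySem.Int.mod (suf * 10 + 1) x, PySem.Int.mod (pre - pw + x) x,
           PySem.Int.mod (pw * 10) x,
           (tBlock mn n0).foldl (updT x mn) (res, pm, ps, pn, pt)) := by
      simp only [stepN]
      refine congrArg (Prod.mk _) (congrArg (Prod.mk _) (congrArg (Prod.mk _) ?_))
      rw [← hblock]
      exact sLoop_eq x mn (mn - n0) n0 _ _ (by omega) hpre' hsuf''
        9 1 0 (res, pm, ps, pn, pt) (by norm_num)
        (by rw [show ((1 : Int) - 1) = 0 from by ring, zero_mul])
    have hRn : R n0.toNat = R (n0 - 1).toNat + 10 ^ (n0 - 1).toNat := by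
      rw [ha]; exact R_succ_pow _
    have hpreR : PySem.Int.mod (pre - pw + x) x ≡ R mn.toNat - R n0.toNat [ZMOD x] := by
      have h2 := (hpre.sub hpw).add hx0
      rw [show R mn.toNat - R (n0 - 1).toNat - 10 ^ (n0 - 1).toNat + 0
        = R mn.toNat - R n0.toNat from by rw [hRn]; ring] at h2
      exact (pymod_modEq _ x).trans h2
    rw [hstep]
    exact ih (n0 + 1) _ _ _ _ (by omega) (by omega)
      (by rwa [show ((n0 : Int) + 1 - 1) = n0 from by ring])
      (by rwa [show ((n0 : Int) + 1 - 1) = n0 from by ring])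
      (by rwa [show ((n0 : Int) + 1 - 1) = n0 from by ring])

-- ---- phase 2 : the pure fold computes the lexicographic minimum of the hit set ----
theorem ltP_irrefl (a : Trip) : ¬ ltP a a := by simp only [ltP]; omega

theorem ltP_asymm {a b : Trip} (h : ltP a b) : ¬ ltP b a := by
  intro h2; exact ltP_irrefl a (ltP_trans h h2)

theorem updT_val (x mn : Int) (q p : Trip) :
    updT x mn (valT mn q) p = valT mn (min2 x mn q p) := by
  simp only [updT, min2, valT]
  norm_num
  split_ifs <;> rfl

theorem foldl_updT_val (x mn : Int) : ∀ (L : List Trip) (q : Trip),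
    L.foldl (updT x mn) (valT mn q) = valT mn (L.foldl (min2 x mn) q) := by
  intro L
  induction L with
  | nil => intro q; rfl
  | cons p L ih => intro q; simp only [List.foldl_cons, updT_val]; exact ih _

theorem foldl_min2_spec (x mn : Int) : ∀ (L : List Trip) (q : Trip),
    (L.foldl (min2 x mn) q = q ∨ L.foldl (min2 x mn) q ∈ L) ∧
    (hitP x mn q → hitP x mn (L.foldl (min2 x mn) q)) ∧
    (∀ h ∈ L, hitP x mn h → ¬ ltP h (L.foldl (min2 x mn) q)) ∧
    (L.foldl (min2 x mn) q = q ∨ ltP (L.foldl (min2 x mn) q) q) := by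
  intro L
  induction L with
  | nil =>
    intro q
    refine ⟨Or.inl rfl, fun h => h, by simp, Or.inl rfl⟩
  | cons p L ih =>
    intro q
    simp only [List.foldl_cons]
    by_cases h : hitP x mn p ∧ ltP p q
    · have hq' : min2 x mn q p = p := by simp [min2, h]
      rw [hq']
      obtain ⟨A, B, C, D⟩ := ih p
      refine ⟨?_, fun _ => B h.1, ?_, ?_⟩
      · rcases A with h2 | h2
        · exact Or.inr (by simp [h2])
        · exact Or.inr (List.mem_cons_of_mem _ h2)
      · intro h' hmem hh'
        rcases List.mem_cons.1 hmem with rfl | hmem2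
        · rcases D with h2 | h2
          · rw [h2]; exact ltP_irrefl _
          · intro h3; exact ltP_asymm h2 h3
        · exact C h' hmem2 hh'
      · rcases D with h2 | h2
        · exact Or.inr (by rw [h2]; exact h.2)
        · exact Or.inr (ltP_trans h2 h.2)
    · have hq' : min2 x mn q p = q := by simp [min2, h]
      rw [hq']
      obtain ⟨A, B, C, D⟩ := ih q
      refine ⟨?_, B, ?_, D⟩
      · rcases A with h2 | h2
        · exact Or.inl h2
        · exact Or.inr (List.mem_cons_of_mem _ h2)
      · intro h' hmem hh'
        rcases List.mem_cons.1 hmem with rfl | hmem2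
        · intro h3
          have hnpq : ¬ ltP h' q := fun hlt => h ⟨hh', hlt⟩
          rcases D with h2 | h2
          · exact hnpq (h2 ▸ h3)
          · exact hnpq (ltP_trans h3 h2)
        · exact C h' hmem2 hh' 

theorem foldA_char (x mn : Int) : ∀ (L : List Trip),
    L.foldl (updT x mn) ((-1 : Int), (0 : Int), (0 : Int), (0 : Int), (0 : Int))
      = (match minHit? x mn L with
         | none => ((-1 : Int), (0 : Int), (0 : Int), (0 : Int), (0 : Int))
         | some p => valT mn p) := by
  have aux : ∀ (L : List Trip) (q : Trip),
      L.foldl (fun acc p =>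
        match acc with
        | none => if hitP x mn p then some p else none
        | some q' => some (min2 x mn q' p)) (some q) = some (L.foldl (min2 x mn) q) := by
    intro L
    induction L with
    | nil => intro q; rfl
    | cons p L ih => intro q; simp only [List.foldl_cons]; exact ih _
  intro L
  induction L with
  | nil => rfl
  | cons p L ih =>
    simp only [List.foldl_cons, minHit?] at *
    by_cases h : hitP x mn p
    · have h0 : updT x mn ((-1 : Int), (0:Int), (0:Int), (0:Int), (0:Int)) p = valT mn p := by
        simp [updT, h]
      rw [h0, if_pos h, aux, foldl_updT_val]
    · have h0 : updT x mn ((-1 : Int), (0:Int), (0:Int), (0:Int), (0:Int)) p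
          = ((-1 : Int), (0:Int), (0:Int), (0:Int), (0:Int)) := by
        simp [updT, h]
      rw [h0, if_neg h]
      exact ih

theorem minHit?_none (x mn : Int) {L : List Trip} (h : minHit? x mn L = none) :
    ∀ q ∈ L, ¬ hitP x mn q := by
  have aux : ∀ (L : List Trip) (q : Trip),
      L.foldl (fun acc p =>
        match acc with
        | none => if hitP x mn p then some p else none
        | some q' => some (min2 x mn q' p)) (some q) = some (L.foldl (min2 x mn) q) := by
    intro L
    induction L with
    | nil => intro q; rfl
    | cons p L ih => intro q; simp only [List.foldl_cons]; exact ih _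
  induction L with
  | nil => simp
  | cons p L ih =>
    simp only [minHit?, List.foldl_cons] at h ⊢
    by_cases hp : hitP x mn p
    · rw [if_pos hp, aux] at h; exact absurd h (by simp)
    · rw [if_neg hp] at h
      intro q hq
      rcases List.mem_cons.1 hq with rfl | hq2
      · exact hp
      · exact ih h q hq2

theorem minHit?_some (x mn : Int) {L : List Trip} {p : Trip} (h : minHit? x mn L = some p) :
    p ∈ L ∧ hitP x mn p ∧ ∀ q ∈ L, hitP x mn q → ¬ ltP q p := by
  have aux : ∀ (L : List Trip) (q : Trip),
      L.foldl (fun acc p =>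
        match acc with
        | none => if hitP x mn p then some p else none
        | some q' => some (min2 x mn q' p)) (some q) = some (L.foldl (min2 x mn) q) := by
    intro L
    induction L with
    | nil => intro q; rfl
    | cons p L ih => intro q; simp only [List.foldl_cons]; exact ih _
  induction L with
  | nil => simp [minHit?] at h
  | cons a L ih =>
    simp only [minHit?, List.foldl_cons] at h
    by_cases ha : hitP x mn a
    · rw [if_pos ha, aux] at h
      have hp : p = L.foldl (min2 x mn) a := by simpa using h.symm
      obtain ⟨A, B, C, D⟩ := foldl_min2_spec x mn L a
      rw [← hp] at A B C D
      refine ⟨?_, B ha, ?_⟩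
      · rcases A with h2 | h2
        · simp [h2]
        · exact List.mem_cons_of_mem _ h2
      · intro q hq hhq
        rcases List.mem_cons.1 hq with rfl | hq2
        · rcases D with h2 | h2
          · rw [h2]; exact ltP_irrefl _
          · exact fun h3 => ltP_asymm h2 h3
        · exact C q hq2 hhq
    · rw [if_neg ha] at h
      obtain ⟨hm, hh, hmin⟩ := ih h
      refine ⟨List.mem_cons_of_mem _ hm, hh, ?_⟩
      intro q hq hhq
      rcases List.mem_cons.1 hq with rfl | hq2
      · exact absurd hhq ha
      · exact hmin q hq2 hhq

theorem mem_tripsFrom_iff {mn : Int} {p : Trip} : p ∈ tripsFrom mn 1 ↔ inR mn p := by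
  obtain ⟨s, m, t⟩ := p
  simp only [tripsFrom, tBlock, List.mem_flatMap, List.mem_map,
    PySem.List.mem_pyRange_one, inR]
  constructor
  · rintro ⟨n, ⟨hn1, hn2⟩, s', ⟨hs1, hs2⟩, t', ⟨ht1, ht2⟩, heq⟩
    simp only [Prod.mk.injEq] at heq
    obtain ⟨rfl, hm, rfl⟩ := heq
    refine ⟨by omega, by omega, by omega, by omega, by omega, by omega⟩
  · rintro ⟨h1, h2, h3, h4, h5, h6⟩
    exact ⟨mn - m, ⟨by omega, by omega⟩, s, ⟨h1, h2⟩, t, ⟨h5, h6⟩,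
      by simp only [Prod.mk.injEq]; refine ⟨trivial, by omega, trivial⟩⟩

-- ---- B-side characterisation ----
theorem findSome?_pyRange_some {β : Type} (f : Int → Option β) (a b i : Int) {y : β}
    (ha : a ≤ i) (hi : i < b) (hf : f i = some y)
    (hnone : ∀ j, a ≤ j → j < i → f j = none) :
    (PySem.List.pyRange a b).findSome? f = some y := by
  suffices H : ∀ (c : Nat) (a : Int), (i - a).toNat = c → a ≤ i →
      (∀ j, a ≤ j → j < i → f j = none) → (PySem.List.pyRange a b).findSome? f = some y by
    exact H _ a rfl ha hnone
  intro c
  induction c with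
  | zero =>
    intro a hc haa hn
    have hai : a = i := by omega
    rw [PySem.List.pyRange_one_cons (by omega), List.findSome?_cons, hai, hf]
  | succ c ih =>
    intro a hc haa hn
    rw [PySem.List.pyRange_one_cons (by omega), List.findSome?_cons,
      hn a le_rfl (by omega)]
    exact ih (a + 1) (by omega) (by omega) (fun j h1 h2 => hn j (by omega) h2)

theorem bPerMn_none (x mn : Int) (h : ∀ p, inR mn p → ¬ hitP x mn p) :
    bPerMn x mn = none := by
  unfold bPerMn
  rw [List.findSome?_eq_none_iff]
  intro s hs
  rw [List.findSome?_eq_none_iff]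
  intro m hm
  rw [List.findSome?_eq_none_iff]
  intro t ht
  rw [PySem.List.mem_pyRange_one] at hs hm ht
  rw [if_neg]
  intro hcond
  exact h (s, m, t) ⟨hs.1, hs.2, hm.1, hm.2, ht.1, ht.2⟩ ⟨hcond.1, hcond.2⟩

theorem bPerMn_some (x mn : Int) (p : Trip) (hin : inR mn p) (hhit : hitP x mn p)
    (hmin : ∀ q, inR mn q → hitP x mn q → ¬ ltP q p) :
    bPerMn x mn = some [p.2.1, p.1, mn - p.2.1, p.2.2] := by
  obtain ⟨s0, m0, t0⟩ := p
  obtain ⟨hb1, hb2, hb3, hb4, hb5, hb6⟩ := hin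
  simp only at hb1 hb2 hb3 hb4 hb5 hb6 ⊢
  have hcf : ∀ s m t : Int, 1 ≤ s → s < 10 → 1 ≤ m → m < mn → 0 ≤ t → t < 10 →
      ltP (s, m, t) (s0, m0, t0) →
      ¬ (t ≠ s ∧ PySem.Int.mod (s * repB m * 10 ^ (mn - m).toNat + t * repB (mn - m)) x = 0) := by
    intro s m t h1 h2 h3 h4 h5 h6 hlt hcond
    exact hmin (s, m, t) ⟨h1, h2, h3, h4, h5, h6⟩ ⟨hcond.1, hcond.2⟩ hlt
  unfold bPerMn
  apply findSome?_pyRange_some _ _ _ s0 hb1 hb2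
  · -- at s0 : the m-level findSome? yields the answer
    apply findSome?_pyRange_some _ _ _ m0 hb3 hb4
    · -- at m0 : the t-level findSome? yields the answer
      apply findSome?_pyRange_some _ _ _ t0 hb5 hb6
      · exact if_pos ⟨hhit.1, hhit.2⟩
      · intro t h1 h2
        exact if_neg (hcf s0 m0 t hb1 hb2 hb3 hb4 h1 (by omega)
          (by simp [ltP]; omega))
    · intro m h1 h2
      rw [List.findSome?_eq_none_iff]
      intro t ht
      rw [PySem.List.mem_pyRange_one] at ht
      exact if_neg (hcf s0 m t hb1 hb2 h1 (by omega) ht.1 ht.2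
        (by simp [ltP]; omega))
  · intro s h1 h2
    rw [List.findSome?_eq_none_iff]
    intro m hm
    rw [List.findSome?_eq_none_iff]
    intro t ht
    rw [PySem.List.mem_pyRange_one] at hm ht
    exact if_neg (hcf s m t h1 (by omega) hm.1 hm.2 ht.1 ht.2
      (by simp [ltP]; omega))

-- ---- per-length and outer-loop assembly ----
def aStep (x mn : Int) (st : S5) : S5 :=
  let pre11 := (PySem.List.pyRange 0 mn).foldl
    (fun p _ => PySem.Int.mod (p * 10 + 1) x) 0
  let r := (PySem.List.pyRange 1 mn).foldl (stepN x mn) (0, pre11, 1, st)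
  r.2.2.2

theorem perMn (x mn : Int) :
    (match bPerMn x mn with
     | none => aStep x mn ((-1 : Int), (0:Int), (0:Int), (0:Int), (0:Int)) = (-1, 0, 0, 0, 0)
     | some out =>
        (aStep x mn (-1, 0, 0, 0, 0)).1 = 0 ∧
        [(aStep x mn (-1, 0, 0, 0, 0)).2.1, (aStep x mn (-1, 0, 0, 0, 0)).2.2.1,
         (aStep x mn (-1, 0, 0, 0, 0)).2.2.2.1, (aStep x mn (-1, 0, 0, 0, 0)).2.2.2.2] = out) := by
  have hpre0 : (PySem.List.pyRange 0 mn).foldl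
      (fun p _ => PySem.Int.mod (p * 10 + 1) x) 0 ≡ R mn.toNat [ZMOD x] := by
    have h := pre0_cong x (PySem.List.pyRange 0 mn) 0 0 (by rfl)
    rwa [PySem.List.length_pyRange_one, show (0 + (mn - 0).toNat) = mn.toNat from by omega] at h
  have hchar : aStep x mn ((-1 : Int), (0:Int), (0:Int), (0:Int), (0:Int))
      = (match minHit? x mn (tripsFrom mn 1) with
         | none => ((-1 : Int), (0:Int), (0:Int), (0:Int), (0:Int))
         | some p => valT mn p) := by
    unfold aStep
    rw [nLoop_eq x mn (mn - 1).toNat 1 0 _ 1 _ rfl le_rfl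
      (by rfl) (by simpa [R] using hpre0) (by rfl)]
    exact foldA_char x mn _
  rcases hmh : minHit? x mn (tripsFrom mn 1) with _ | p
  · rw [hmh] at hchar
    have hnone : bPerMn x mn = none := by
      apply bPerMn_none
      intro p hp
      exact minHit?_none x mn hmh p (mem_tripsFrom_iff.2 hp)
    rw [hnone]
    exact hchar
  · rw [hmh] at hchar
    obtain ⟨hmem, hhit, hmin⟩ := minHit?_some x mn hmh
    have hsome : bPerMn x mn = some [p.2.1, p.1, mn - p.2.1, p.2.2] :=
      bPerMn_some x mn p (mem_tripsFrom_iff.1 hmem) hhit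
        (fun q hq hhq => hmin q (mem_tripsFrom_iff.2 hq) hhq)
    rw [hsome]
    constructor
    · rw [hchar]; rfl
    · rw [hchar]; rfl

theorem mnLoopA_cons (x mn : Int) (rest : List Int) (st : S5) :
    mnLoopA x (mn :: rest) st =
      (if (aStep x mn st).1 ≠ -1 then aStep x mn st else mnLoopA x rest (aStep x mn st)) := by
  rfl

theorem outerLoop (x : Int) : ∀ (L : List Int),
    (let st := mnLoopA x L (-1, 0, 0, 0, 0)
     [st.2.1, st.2.2.1, st.2.2.2.1, st.2.2.2.2])
      = (L.findSome? (bPerMn x)).getD [0, 0, 0, 0] := by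
  intro L
  induction L with
  | nil => rfl
  | cons mn L ih =>
    rw [mnLoopA_cons, List.findSome?_cons]
    have hp := perMn x mn
    rcases hb : bPerMn x mn with _ | out
    · rw [hb] at hp
      rw [hp]
      simpa using ih
    · rw [hb] at hp
      rw [if_pos (by rw [hp.1]; norm_num)]
      simpa using hp.2

-- ===== VERDICT (by name: the statement is the Claim_ definition above) =====
theorem bPerMn_one (x : Int) : bPerMn x 1 = none := by
  apply bPerMn_none
  rintro ⟨s, m, t⟩ ⟨h1, h2, h3, h4, h5, h6⟩ _
  simp only at h3 h4
  omega

theorem solve_spec : Claim_equal_solve := by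
  intro x _ _
  unfold Spec_solve solve solve_alt
  rw [outerLoop x (PySem.List.pyRange 1 1000)]
  rw [PySem.List.pyRange_one_cons (by norm_num), List.findSome?_cons, bPerMn_one]
  norm_num
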